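-- pv_equiv track=rewrite | github.com/8080509/Permutation-Generators | SymmetricGroups3.py | admValIter
-- ===== SOURCE A (Python) =====
-- def subsetIter(coll, k): #Iterates through the k-element subsets of a collection.
-- 	if k == 0: yield []; return
-- 	tCol = coll.copy()
-- 	for _ in range(k-1, len(tCol)):  # we want to select items from tCol, so long as what remains has at least k-1 entries.  This just makes it run the loop that many times.
-- 		x = tCol.pop()
-- 		for i in subsetIter(tCol, k-1): i.append(x); yield i #Iterates through subsets with one fewer element from the collection of items not yet used in this level.
--
-- def admValIter(pins):
-- 	if not pins:
-- 		yield {1}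
-- 		return
-- 	coll = [i for i in range(1, max(pins)) if i not in pins]
-- 	for i in subsetIter(coll, len(pins)):
-- 		i.append(0)
-- 		i = set(i)
-- 		if admiscible(pins, i): yield i
-- 	return
--
-- def admiscible(P,V):
-- 	if 0 not in V: return False
-- 	if len(V) != len(P) + 1: return False
-- 	n = 0
-- 	for i in sorted((*P, *V)):
-- 		if i in V: n += 1; continue
-- 		if n < 2: return False
-- 		n -= 1
-- 	return True
-- ===== SOURCE B (Python) =====
-- def admValIter(pins):
-- 	if not pins:
-- 		yield {1}
-- 		return
-- 	coll = [i for i in range(1, max(pins)) if i not in pins]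
-- 	for combo in _ksubs(coll[::-1], len(pins)):
-- 		V = set(combo)
-- 		V.add(0)
-- 		if _admissible(pins, V):
-- 			yield V
--
-- def _ksubs(xs, k):
-- 	# k-subsets of xs, positions chosen left to right, elements emitted back to front
-- 	if k == 0:
-- 		yield []
-- 		return
-- 	for j in range(len(xs) - k + 1):
-- 		for rest in _ksubs(xs[j+1:], k - 1):
-- 			yield rest + [xs[j]]
--
-- def _prefix_sums(ds, t=0):
-- 	if not ds:
-- 		return []
-- 	return [t + ds[0]] + _prefix_sums(ds[1:], t + ds[0])
--
-- def _admissible(P, V):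
-- 	if 0 not in V or len(V) != len(P) + 1:
-- 		return False
-- 	s = sorted(list(P) + list(V))
-- 	deltas = [1 if i in V else -1 for i in s]
-- 	return all(b >= 1 for b, d in zip(_prefix_sums(deltas), deltas) if d == -1)
-- ===== Notes on version B (the rewrite author's own statement) =====
-- stated objective: alternative
-- what changed: The pop-from-the-end recursive subset generator is replaced by an index-loop recursion over the reversed collection that builds each subset back-to-front, and admiscible's early-return counter scan is replaced by a prefix-sums-and-all check over the sorted merged list.
import Mathlib
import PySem

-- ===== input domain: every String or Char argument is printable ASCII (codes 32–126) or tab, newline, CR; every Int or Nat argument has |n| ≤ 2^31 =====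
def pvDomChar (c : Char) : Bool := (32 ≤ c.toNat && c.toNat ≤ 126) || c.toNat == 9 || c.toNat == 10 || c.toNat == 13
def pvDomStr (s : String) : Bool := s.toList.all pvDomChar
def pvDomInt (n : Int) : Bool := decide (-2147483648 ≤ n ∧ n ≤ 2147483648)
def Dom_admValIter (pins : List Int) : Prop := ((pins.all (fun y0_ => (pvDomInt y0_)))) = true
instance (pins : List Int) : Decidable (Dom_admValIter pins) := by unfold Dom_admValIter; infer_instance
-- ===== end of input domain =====

-- B replaces the pop-from-the-end recursive generator by an index-loop recursion over
-- the reversed collection and the early-return counter scan of admiscible by a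
-- prefix-sums check (objective: alternative); return-value equivalence only (A's
-- generator mutates the lists it yields internally; callers never observe that).

-- ===== PORT A =====
-- admiscible's loop with early return False; n carried as Int
def admLoopA (V : List Int) : List Int → Int → Bool
  | [], _ => true
  | i :: rest, n =>
    if V.contains i then admLoopA V rest (n + 1)
    else if n < 2 then false
    else admLoopA V rest (n - 1)

def admiscibleA (P V : List Int) : Bool :=
  if !(V.contains 0) then false
  else if V.length ≠ P.length + 1 then false
  else admLoopA V (PySem.List.sorted (P ++ V) (fun x => x) false) 0

-- subsetIter: 'for _ in range(k-1, len(tCol))' runs (len(tCol) - (k-1)) times; each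
-- iteration pops the last element (pop on a nonempty list is exact here: the loop
-- count guarantees tCol is nonempty at every pop, so getLastD/dropLast are exact).
mutual
def subsetIterA (k : Nat) (coll : List Int) : List (List Int) :=
  match k with
  | 0 => [[]]
  | (k' + 1) => subsetLoopA k' coll (coll.length - k')
termination_by (k, 0)
def subsetLoopA (k : Nat) (tCol : List Int) (n : Nat) : List (List Int) :=
  match n with
  | 0 => []
  | (n' + 1) =>
    let x := tCol.getLastD 0
    let tCol' := tCol.dropLast
    (subsetIterA k tCol').map (fun i => i ++ [x]) ++ subsetLoopA k tCol' n'
termination_by (k, n)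
end

def admValIter (pins : List Int) : List (List Int) :=
  if pins = [] then [[1]]
  else
    -- max(pins): pins ≠ [] in this branch, so max? is some and never raises
    let m := (PySem.List.max? pins (fun x => x)).getD 0
    let coll := (PySem.List.pyRange 1 m 1).filter (fun i => !(pins.contains i))
    ((subsetIterA pins.length coll).map (fun i => PySem.Set.ofList (i ++ [0]))).filter
      (fun v => admiscibleA pins v)

-- ===== PORT B =====
-- _ksubs: for j in range(len(xs)-k+1): yield rest + [xs[j]]; xs[j] is always in
-- range (j < len(xs)-k+1 ≤ len(xs)), so getD is exact; xs[j+1:] = drop (j+1)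
def ksubsB (xs : List Int) (k : Nat) : List (List Int) :=
  match k with
  | 0 => [[]]
  | k' + 1 =>
    (List.range (xs.length - k')).flatMap (fun j =>
      (ksubsB (xs.drop (j + 1)) k').map (fun rest => rest ++ [xs.getD j 0]))
termination_by k

-- _prefix_sums(ds, t)
def prefixSumsB (ds : List Int) (t : Int) : List Int :=
  match ds with
  | [] => []
  | d :: rest => (t + d) :: prefixSumsB rest (t + d)

-- _admissible: prefix-sum formulation; the genexp's 'if d == -1' filter is a List.filter
def admissibleB (P V : List Int) : Bool :=
  if !(V.contains 0) || V.length ≠ P.length + 1 then false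
  else
    let s := PySem.List.sorted (P ++ V) (fun x => x) false
    let ds := s.map (fun i => if V.contains i then (1 : Int) else -1)
    -- all(... for b, d in zip(...) if d == -1)  ≡  every pair satisfies d == -1 → b ≥ 1
    ((prefixSumsB ds 0).zip ds).all (fun bd => !(bd.2 == -1) || 1 ≤ bd.1)

def admValIter_alt (pins : List Int) : List (List Int) :=
  if pins = [] then [[1]]
  else
    let m := (PySem.List.max? pins (fun x => x)).getD 0
    let coll := (PySem.List.pyRange 1 m 1).filter (fun i => !(pins.contains i))
    ((ksubsB coll.reverse pins.length).map
        (fun combo => PySem.Set.add (PySem.Set.ofList combo) 0)).filter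
      (fun v => admissibleB pins v)

-- ===== PRECONDITION & SPEC =====
def Spec_admValIter (pins : List Int) (out : List (List Int)) : Prop := out = admValIter_alt pins
instance (pins : List Int) (out : List (List Int)) : Decidable (Spec_admValIter pins out) := by unfold Spec_admValIter; infer_instance

-- ===== CLAIM (what is proved, stated in full; the proofs are below) =====
def Claim_equal_admValIter : Prop := ∀ (pins : List Int), Dom_admValIter pins → Spec_admValIter pins (admValIter pins)

-- ===== LEMMAS AND PROOFS =====

theorem admLoop_eq_prefix (V : List Int) : ∀ (l : List Int) (n : Int),
    admLoopA V l n =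
      (((prefixSumsB (l.map (fun i => if V.contains i then (1 : Int) else -1)) n).zip
          (l.map (fun i => if V.contains i then (1 : Int) else -1))).all
        (fun bd => !(bd.2 == -1) || 1 ≤ bd.1)) := by
  intro l
  induction l with
  | nil => intro n; rfl
  | cons i rest ih =>
    intro n
    by_cases h : i ∈ V
    · simp [admLoopA, prefixSumsB, h, ih]
    · by_cases h2 : n < 2
      · have h3 : ¬ ((1:Int) ≤ n + -1) := by omega
        simp [admLoopA, prefixSumsB, h, h2, h3]
      · have h3 : ((1:Int) ≤ n + -1) := by omega
        simp [admLoopA, prefixSumsB, h, h2, h3, ih, sub_eq_add_neg]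

theorem admiscibleAB (P V : List Int) : admissibleB P V = admiscibleA P V := by
  unfold admiscibleA admissibleB
  by_cases h0 : (0:Int) ∈ V
  · by_cases hl : V.length = P.length + 1
    · simp [h0, hl, admLoop_eq_prefix]
    · simp [h0, hl]
  · simp [h0]

theorem dropLast_reverse_aux (t : List Int) (x : Int) :
    (t ++ [x]).reverse = x :: t.reverse := by simp

theorem subsetLoopA_eq (k : Nat)
    (IH : ∀ c : List Int, subsetIterA k c = ksubsB c.reverse k) :
    ∀ (n : Nat) (tCol : List Int), n ≤ tCol.length →
      subsetLoopA k tCol n =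
        (List.range n).flatMap (fun j =>
          (ksubsB (tCol.reverse.drop (j + 1)) k).map
            (fun rest => rest ++ [tCol.reverse.getD j 0])) := by
  intro n
  induction n with
  | zero => intro tCol _; simp [subsetLoopA]
  | succ n ih =>
    intro tCol h
    rcases tCol.eq_nil_or_concat with rfl | ⟨t', x, rfl⟩
    · simp at h
    · simp only [List.concat_eq_append] at h ⊢
      simp only [subsetLoopA, List.getLastD_concat, List.dropLast_concat]
      rw [ih t' (by simp at h; omega), IH t']
      rw [List.range_succ_eq_map, List.flatMap_cons, List.flatMap_map, dropLast_reverse_aux]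
      congr 1

theorem subsetIterA_eq : ∀ (k : Nat) (coll : List Int),
    subsetIterA k coll = ksubsB coll.reverse k := by
  intro k
  induction k with
  | zero => intro coll; simp [subsetIterA, ksubsB]
  | succ k ih =>
    intro coll
    simp only [subsetIterA]
    rw [subsetLoopA_eq k ih (coll.length - k) coll (by omega)]
    simp only [ksubsB, List.length_reverse]

theorem setOfList_concat (l : List Int) (x : Int) :
    PySem.Set.ofList (l ++ [x]) = PySem.Set.add (PySem.Set.ofList l) x := by
  simp [PySem.Set.ofList_eq_foldl, List.foldl_append]

-- ===== VERDICT (by name: the statement is the Claim_ definition above) =====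
theorem admValIter_spec : Claim_equal_admValIter := by
  intro pins _
  unfold Spec_admValIter admValIter admValIter_alt
  by_cases h : pins = []
  · simp [h]
  · simp only [h, if_false]
    rw [subsetIterA_eq]
    have hpred : (fun v => admissibleB pins v) = (fun v => admiscibleA pins v) :=
      funext (fun v => admiscibleAB pins v)
    rw [hpred]
    congr 1
    apply List.map_congr_left
    intro c _
    simp [setOfList_concat]
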